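-- pv_equiv track=rewrite | github.com/Ai-Whisperers/Comment-Analizer | src/result_converter.py | _extract_themes_from_ai_results
-- ===== SOURCE A (Python) =====
-- from collections import Counter
-- from typing import List, Dict, Any, Optional
--
-- def _extract_themes_from_ai_results(ai_results: List[Dict], comments: List[str]) -> tuple:
--     """Extract theme information from AI results"""
--     all_themes = []
--     theme_examples = {}
--
--     for i, result in enumerate(ai_results):
--         themes = result.get('themes', [])
--         for theme in themes:
--             all_themes.append(theme)
--             if theme not in theme_examples:
--                 theme_examples[theme] = []
--             if len(theme_examples[theme]) < 3:  # Keep max 3 examples per theme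
--                 theme_examples[theme].append(comments[i] if i < len(comments) else "")
--
--     theme_counts = dict(Counter(all_themes))
--     return theme_counts, theme_examples
-- ===== SOURCE B (Python) =====
-- def _extract_themes_from_ai_results(ai_results, comments):
--     """Flatten to (theme, example) pairs, then answer each distinct theme by scanning the flat list."""
--     pairs = [(t, comments[i] if i < len(comments) else "")
--              for i, r in enumerate(ai_results) for t in r.get('themes', [])]
--     firsts = [t for t, _ in pairs]
--     order = list(dict.fromkeys(firsts))
--     theme_counts = {t: firsts.count(t) for t in order}
--     theme_examples = {t: [c for p, c in pairs if p == t][:3] for t in order}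
--     return theme_counts, theme_examples
-- ===== Notes on version B (the rewrite author's own statement) =====
-- stated objective: alternative
-- what changed: B keeps no dictionary state while looping: it flattens the input to a flat list of (theme, example) pairs, dedups the theme list for first-occurrence order, and then answers each distinct theme by rescanning the flat list (count for theme_counts, filter-then-take-3 for theme_examples), replacing A's single pass with inline dict count-and-cap bookkeeping plus a trailing Counter.
import Mathlib
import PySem

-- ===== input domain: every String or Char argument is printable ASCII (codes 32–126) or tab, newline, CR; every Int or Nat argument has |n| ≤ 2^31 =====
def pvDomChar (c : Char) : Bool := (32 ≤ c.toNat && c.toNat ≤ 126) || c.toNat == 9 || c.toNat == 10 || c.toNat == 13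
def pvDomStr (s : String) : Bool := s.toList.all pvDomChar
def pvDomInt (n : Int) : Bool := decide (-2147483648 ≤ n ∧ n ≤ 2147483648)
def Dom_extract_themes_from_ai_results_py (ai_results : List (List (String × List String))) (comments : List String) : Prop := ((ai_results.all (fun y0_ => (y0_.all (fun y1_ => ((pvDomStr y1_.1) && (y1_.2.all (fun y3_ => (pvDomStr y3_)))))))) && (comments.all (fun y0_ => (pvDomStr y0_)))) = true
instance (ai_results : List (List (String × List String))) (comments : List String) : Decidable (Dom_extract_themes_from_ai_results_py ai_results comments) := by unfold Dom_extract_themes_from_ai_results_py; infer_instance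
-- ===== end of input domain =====

-- B keeps no dict state while looping: it flattens the input to (theme, example) pairs, dedups the
-- themes for first-occurrence order, then answers each distinct theme by rescanning the flat list
-- (count / filter-then-take-3), instead of A's inline dict count-and-cap plus trailing Counter (alternative).

-- ===== PORT A =====
-- A's loop state after the two nested for-loops: (all_themes, theme_examples)
def pvAState (ai_results : List (List (String × List String))) (comments : List String) :
    List String × PySem.Dict String (List String) :=
  (PySem.List.enumerate ai_results).foldl
    (fun (st : List String × PySem.Dict String (List String)) ir =>
      ((PySem.Dict.mk ir.2).getD "themes" []).foldl
        (fun (st : List String × PySem.Dict String (List String)) theme =>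
          (st.1 ++ [theme],
           let te := if st.2.contains theme then st.2 else st.2.insert theme []
           if (te.getD theme []).length < 3 then
             te.insert theme (te.getD theme [] ++
               [if ir.1 < (comments.length : Int) then (PySem.List.pyGet? comments ir.1).getD "" else ""])
           else te))
        st)
    ([], PySem.Dict.empty)

def extract_themes_from_ai_results_py (ai_results : List (List (String × List String))) (comments : List String) : (List (String × Int)) × (List (String × List String)) :=
  ((PySem.Dict.counter (pvAState ai_results comments).1).items,
   (pvAState ai_results comments).2.items)

-- ===== PORT B =====
def extract_themes_from_ai_results_py_alt (ai_results : List (List (String × List String))) (comments : List String) : (List (String × Int)) × (List (String × List String)) :=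
  -- pairs = [(t, comments[i] if i < len(comments) else "") for i, r in enumerate(ai_results) for t in r.get('themes', [])]
  let pairs := (PySem.List.enumerate ai_results).flatMap
    (fun ir => ((PySem.Dict.mk ir.2).getD "themes" []).map
      (fun t => (t, if ir.1 < (comments.length : Int) then (PySem.List.pyGet? comments ir.1).getD "" else "")))
  let firsts := pairs.map (·.1)
  let order := PySem.List.dedup firsts        -- list(dict.fromkeys(firsts))
  -- both result dicts are built over the distinct keys of `order`, so their items are these maps
  (order.map (fun t => (t, (PySem.List.count firsts t : Int))),
   order.map (fun t => (t, ((pairs.filter (fun p => p.1 == t)).map (·.2)).take 3)))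

-- ===== PRECONDITION & SPEC =====
def Spec_extract_themes_from_ai_results_py (ai_results : List (List (String × List String))) (comments : List String) (out : (List (String × Int)) × (List (String × List String))) : Prop := out = extract_themes_from_ai_results_py_alt ai_results comments
instance (ai_results : List (List (String × List String))) (comments : List String) (out : (List (String × Int)) × (List (String × List String))) : Decidable (Spec_extract_themes_from_ai_results_py ai_results comments out) := by unfold Spec_extract_themes_from_ai_results_py; infer_instance

-- ===== CLAIM (what is proved, stated in full; the proofs are below) =====
def Claim_equal_extract_themes_from_ai_results_py : Prop := ∀ (ai_results : List (List (String × List String))) (comments : List String), Dom_extract_themes_from_ai_results_py ai_results comments → Spec_extract_themes_from_ai_results_py ai_results comments (extract_themes_from_ai_results_py ai_results comments)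

-- ===== LEMMAS AND PROOFS =====

-- the flat list of (theme, example-comment) pairs both programs process, in order (= B's `pairs`)
def pvPairs (ai_results : List (List (String × List String))) (comments : List String) : List (String × String) :=
  (PySem.List.enumerate ai_results).flatMap
    (fun ir => ((PySem.Dict.mk ir.2).getD "themes" []).map
      (fun t => (t, if ir.1 < (comments.length : Int) then (PySem.List.pyGet? comments ir.1).getD "" else "")))

-- A's theme_examples step, as a function of one (theme, comment) pair
def pvTeStep (te : PySem.Dict String (List String)) (p : String × String) : PySem.Dict String (List String) :=
  let te := if te.contains p.1 then te else te.insert p.1 []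
  if (te.getD p.1 []).length < 3 then te.insert p.1 (te.getD p.1 [] ++ [p.2]) else te

-- reference grouping step (theme -> all its example comments); proof device only
def pvGStep (g : PySem.Dict String (List String)) (p : String × String) : PySem.Dict String (List String) :=
  g.insert p.1 (g.getD p.1 [] ++ [p.2])

lemma pvAState_eq_pairs (ai_results : List (List (String × List String))) (comments : List String) :
    pvAState ai_results comments =
      ((pvPairs ai_results comments).map (·.1),
       (pvPairs ai_results comments).foldl pvTeStep PySem.Dict.empty) := by
  have h2 : (pvPairs ai_results comments).foldl
      (fun (st : List String × PySem.Dict String (List String)) p => (st.1 ++ [p.1], pvTeStep st.2 p))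
      ([], PySem.Dict.empty) =
      ((pvPairs ai_results comments).map (·.1),
       (pvPairs ai_results comments).foldl pvTeStep PySem.Dict.empty) := by
    rw [PySem.List.foldl_prod_mk (f := fun a (p : String × String) => a ++ [p.1]) (g := pvTeStep)]
    rw [PySem.List.foldl_append_singleton_eq_map (f := fun p : String × String => p.1)]
    simp
  rw [← h2]
  unfold pvAState pvPairs
  rw [List.foldl_flatMap]
  simp only [List.foldl_map]
  rfl

-- one step of A's theme_examples update tracks one step of the grouping, through take 3
lemma pvTe_step (te g : PySem.Dict String (List String)) (p : String × String)
    (hk : te.keys = g.keys) (hv : ∀ k, te.getD k [] = (g.getD k []).take 3) :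
    (pvTeStep te p).keys = (pvGStep g p).keys ∧
      ∀ k, (pvTeStep te p).getD k [] = ((pvGStep g p).getD k []).take 3 := by
  obtain ⟨t, c⟩ := p
  have hcont : te.contains t = g.contains t := by
    rw [PySem.Dict.contains_eq_decide_mem_keys, PySem.Dict.contains_eq_decide_mem_keys, hk]
  by_cases hg : g.contains t = true
  · -- key already present in both
    have hct : te.contains t = true := by rw [hcont]; exact hg
    have hcur : te.getD t [] = (g.getD t []).take 3 := hv t
    simp only [pvTeStep, pvGStep, hct, if_true]
    by_cases hlen : (te.getD t []).length < 3
    · have hvl : (g.getD t []).length < 3 := by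
        rw [hcur, List.length_take] at hlen; omega
      have hcur' : te.getD t [] = g.getD t [] := by
        rw [hcur, List.take_of_length_le (by omega)]
      simp only [hlen, if_true]
      constructor
      · rw [PySem.Dict.keys_insert_of_contains _ _ hct, PySem.Dict.keys_insert_of_contains _ _ hg, hk]
      · intro k
        rw [PySem.Dict.getD_insert, PySem.Dict.getD_insert]
        by_cases hkt : k = t
        · simp only [hkt, if_true, hcur']
          rw [List.take_of_length_le (by simp; omega)]
        · simp only [hkt, if_false]; exact hv k
    · simp only [hlen, if_false]
      constructor
      · rw [hk, PySem.Dict.keys_insert_of_contains _ _ hg]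
      · intro k
        rw [PySem.Dict.getD_insert]
        by_cases hkt : k = t
        · have hvl : 3 ≤ (g.getD t []).length := by
            rw [hcur, List.length_take] at hlen; omega
          simp only [hkt, if_true]
          rw [hcur, List.take_append_of_le_length hvl]
        · simp only [hkt, if_false]; exact hv k
  · -- fresh key in both
    have hgf : g.contains t = false := by simpa using hg
    have hct : te.contains t = false := by rw [hcont]; exact hgf
    have hgv : g.getD t [] = [] := PySem.Dict.getD_of_not_contains _ _ hgf
    simp only [pvTeStep, pvGStep, hct, if_false, Bool.false_eq_true]
    rw [PySem.Dict.getD_insert_self]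
    simp only [List.length_nil, Nat.zero_lt_succ, if_true, List.nil_append]
    rw [PySem.Dict.insert_insert_self]
    constructor
    · rw [PySem.Dict.keys_insert_of_not_contains _ _ hct,
        PySem.Dict.keys_insert_of_not_contains _ _ hgf, hk]
    · intro k
      rw [PySem.Dict.getD_insert, PySem.Dict.getD_insert]
      by_cases hkt : k = t
      · simp [hkt, hgv]
      · simp only [hkt, if_false]; exact hv k

-- the fold invariant
lemma pvTe_inv (l : List (String × String)) :
    ∀ (te g : PySem.Dict String (List String)), te.keys = g.keys →
      (∀ k, te.getD k [] = (g.getD k []).take 3) →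
      (l.foldl pvTeStep te).keys = (l.foldl pvGStep g).keys ∧
        ∀ k, (l.foldl pvTeStep te).getD k [] = ((l.foldl pvGStep g).getD k []).take 3 := by
  induction l with
  | nil => intro te g hk hv; exact ⟨hk, hv⟩
  | cons p tl ih =>
    intro te g hk hv
    obtain ⟨hk', hv'⟩ := pvTe_step te g p hk hv
    exact ih _ _ hk' hv'

-- the grouping fold, characterised
lemma pvGStep_eq_modify :
    pvGStep = fun (g : PySem.Dict String (List String)) (p : String × String) =>
      g.modify p.1 [] (· ++ [p.2]) := rfl

lemma pvG_keys (l : List (String × String)) :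
    (l.foldl pvGStep PySem.Dict.empty).keys = PySem.Set.ofList (l.map (·.1)) := by
  rw [pvGStep_eq_modify,
    PySem.Dict.keys_foldl_modify_key l (fun p : String × String => p.1) []
      (fun _ p => (· ++ [p.2])) PySem.Dict.empty, PySem.Dict.keys_empty]
  rfl

lemma pvG_nodup (l : List (String × String)) :
    (l.foldl pvGStep PySem.Dict.empty).keys.Nodup := by
  rw [pvGStep_eq_modify]
  exact PySem.Dict.nodup_keys_foldl_modify_key l (fun p : String × String => p.1) []
    (fun _ p => (· ++ [p.2])) PySem.Dict.empty (by simp [PySem.Dict.keys_empty])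

lemma pvG_getD (l : List (String × String)) (k : String) :
    (l.foldl pvGStep PySem.Dict.empty).getD k [] = (l.filter (fun p => p.1 == k)).map (·.2) := by
  rw [pvGStep_eq_modify]
  rw [PySem.Dict.getD_foldl_modify_append l PySem.Dict.empty k]
  simp [PySem.Dict.getD_empty]

-- ===== VERDICT (by name: the statement is the Claim_ definition above) =====
theorem extract_themes_from_ai_results_py_spec : Claim_equal_extract_themes_from_ai_results_py := by
  intro ai_results comments _
  unfold Spec_extract_themes_from_ai_results_py extract_themes_from_ai_results_py
    extract_themes_from_ai_results_py_alt
  rw [pvAState_eq_pairs]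
  show (_, _) = _
  simp only []
  set P := pvPairs ai_results comments with hP
  set G := P.foldl pvGStep PySem.Dict.empty with hG
  set T := P.foldl pvTeStep PySem.Dict.empty with hT
  obtain ⟨hk, hv⟩ := pvTe_inv P PySem.Dict.empty PySem.Dict.empty rfl (by intro k; rfl)
  have hkeys : T.keys = PySem.List.dedup (P.map (·.1)) := by
    rw [hk, ← hG, pvG_keys, PySem.List.dedup_eq_ofList]
  have hTnodup : T.keys.Nodup := by rw [hk, ← hG]; exact pvG_nodup P
  have hcounts : (PySem.Dict.counter (P.map (·.1))).items
      = (PySem.List.dedup (P.map (·.1))).map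
          (fun t => (t, (PySem.List.count (P.map (·.1)) t : Int))) := by
    rw [PySem.Dict.items_counter, PySem.List.dedup_eq_ofList]
    rfl
  have hex : T.items = (PySem.List.dedup (P.map (·.1))).map
      (fun t => (t, ((P.filter (fun p => p.1 == t)).map (·.2)).take 3)) := by
    rw [PySem.Dict.items_eq_map_keys T hTnodup [], hkeys]
    apply List.map_congr_left
    intro k _
    simp only [Prod.mk.injEq, true_and]
    rw [hv k, pvG_getD]
  exact Prod.ext hcounts hex
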